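-- pv_equiv track=rewrite | github.com/Gui11452/Inteligencia_Ilimitada | home/utils.py | is_popular_tld
-- ===== SOURCE A (Python) =====
-- popular_tlds = ['.com', '.net', '.org', '.com.br', '.edu', '.gov', '.co', '.io', '.co.uk', '.de', '.fr']
--
-- def is_popular_tld(url):
--     #clean_url = extract_domain_url(url)
--
--     # Extrai a parte após o primeiro ponto
--     domain_parts = url.split('.')
--     if len(domain_parts) < 2:
--         return False  # Se o domínio não contiver uma extensão válida, não é popular
--
--     # Tenta combinar as partes do domínio para encontrar o TLD mais longo correspondente
--     for i in range(len(domain_parts) - 1):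
--         tld = '.' + '.'.join(domain_parts[i + 1:])
--         if tld in popular_tlds:
--             return True
--
--     return False
-- ===== SOURCE B (Python) =====
-- popular_tlds = ['.com', '.net', '.org', '.com.br', '.edu', '.gov', '.co', '.io', '.co.uk', '.de', '.fr']
--
-- def is_popular_tld(url):
--     # Every popular TLD starts with '.', so a direct suffix test at a dot
--     # boundary is exactly what A's split-and-rejoin candidate search computes.
--     return any(url.endswith(tld) for tld in popular_tlds)
-- ===== Notes on version B (the rewrite author's own statement) =====
-- stated objective: simpler
-- what changed: Instead of splitting the URL on '.' and rebuilding every '.'-joined suffix candidate to test membership in the TLD table, B iterates once over the fixed TLD list and returns whether the URL ends with any of them; this is exact because every table entry starts with '.', so endswith can only fire at a dot boundary.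
import Mathlib
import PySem

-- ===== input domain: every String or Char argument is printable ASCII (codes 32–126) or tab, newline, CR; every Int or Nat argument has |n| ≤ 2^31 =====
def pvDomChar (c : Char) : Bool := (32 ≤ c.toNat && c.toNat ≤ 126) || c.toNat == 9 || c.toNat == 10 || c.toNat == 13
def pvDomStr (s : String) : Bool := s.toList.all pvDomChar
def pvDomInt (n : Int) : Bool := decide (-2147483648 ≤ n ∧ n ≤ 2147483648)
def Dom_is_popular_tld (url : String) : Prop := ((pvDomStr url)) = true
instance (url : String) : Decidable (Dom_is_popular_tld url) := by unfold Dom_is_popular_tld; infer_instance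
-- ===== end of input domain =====

-- B replaces A's split-and-rejoin candidate search by a direct endswith test
-- against the fixed TLD list (objective: simpler); proved equal for all URLs.


-- module-level constant shared by both Pythons
def popular_tlds : List String :=
  [".com", ".net", ".org", ".com.br", ".edu", ".gov", ".co", ".io", ".co.uk", ".de", ".fr"]

-- ===== PORT A =====
-- url.split('.') : the separator "." is a nonempty literal, so split? is always
-- `some`; the early-returning `for` over range(len-1) is the `any` over pyRange.
def is_popular_tld (url : String) : Bool :=
  let domain_parts : List String := (PySem.Str.split? url ".").getD []
  if PySem.List.len domain_parts < 2 then false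
  else
    (PySem.List.pyRange 0 (PySem.List.len domain_parts - 1)).any (fun i =>
      let tld : String := "." ++ PySem.Str.join "." (PySem.List.slice domain_parts (some (i + 1)))
      popular_tlds.contains tld)

-- ===== PORT B =====
def is_popular_tld_alt (url : String) : Bool :=
  popular_tlds.any (fun tld => PySem.Str.endswith url tld)

-- ===== PRECONDITION & SPEC =====
def Spec_is_popular_tld (url : String) (out : Bool) : Prop := out = is_popular_tld_alt url
instance (url : String) (out : Bool) : Decidable (Spec_is_popular_tld url out) := by unfold Spec_is_popular_tld; infer_instance

-- ===== CLAIM (what is proved, stated in full; the proofs are below) =====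
def Claim_equal_is_popular_tld : Prop := ∀ (url : String), Dom_is_popular_tld url → Spec_is_popular_tld url (is_popular_tld url)

-- ===== LEMMAS AND PROOFS =====

-- PySem.Chars.splitOn with a single-char separator is core `List.splitOn`.
theorem splitOn_go_spec (fuel : Nat) (l cur : List Char) (acc : List (List Char))
    (h : l.length ≤ fuel) :
    PySem.Chars.splitOn.go ['.'] fuel l cur acc
      = acc.reverse ++ (l.splitOn '.').modifyHead (cur.reverse ++ ·) := by
  induction fuel generalizing l cur acc with
  | zero =>
      cases l with
      | nil => rw [PySem.Chars.splitOn.go.eq_def]; simp [List.splitOn_nil]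
      | cons c rest => simp at h
  | succ n ih =>
      cases l with
      | nil => rw [PySem.Chars.splitOn.go.eq_def]; simp [List.splitOn_nil]
      | cons c rest =>
        rw [PySem.Chars.splitOn.go.eq_def]
        show (if ['.'].isPrefixOf (c :: rest) = true then
                PySem.Chars.splitOn.go ['.'] n (List.drop ['.'].length (c :: rest)) [] (cur.reverse :: acc)
              else PySem.Chars.splitOn.go ['.'] n rest (c :: cur) acc) = _
        by_cases hc : c = '.'
        · subst hc
          rw [if_pos (by simp [List.isPrefixOf])]
          have hdrop : List.drop ['.'].length ('.' :: rest) = rest := rfl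
          rw [hdrop, ih rest [] _ (by simpa using h)]
          simp only [List.splitOn, List.splitOnP_cons]
          cases List.splitOnP (fun x => x == '.') rest <;> simp [List.modifyHead]
        · rw [if_neg (by simp [List.isPrefixOf]; intro hcontra; exact hc hcontra.symm)]
          rw [ih rest (c :: cur) acc (by simpa using h)]
          simp only [List.splitOn, List.splitOnP_cons]
          rw [if_neg (by simp [hc]), List.modifyHead_modifyHead]
          congr 2
          funext x
          simp

theorem chars_splitOn_dot (cs : List Char) :
    PySem.Chars.splitOn cs ['.'] = cs.splitOn '.' := by
  unfold PySem.Chars.splitOn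
  rw [splitOn_go_spec _ _ _ _ (by omega)]
  cases h : cs.splitOn '.' <;> simp [List.modifyHead]

-- splitting at an explicit dot splits the two halves independently
theorem splitOn_dot_append (p r : List Char) :
    (p ++ '.' :: r).splitOn '.' = p.splitOn '.' ++ r.splitOn '.' := by
  induction p with
  | nil => simp [List.splitOn, List.splitOnP_cons]
  | cons c p ih =>
    simp only [List.cons_append, List.splitOn, List.splitOnP_cons] at ih ⊢
    by_cases hc : c = '.'
    · simp [hc, ih]
    · rw [if_neg (by simp [hc]), if_neg (by simp [hc]), ih]
      obtain ⟨x, xs, hx⟩ := List.exists_cons_of_ne_nil (List.splitOnP_ne_nil (· == '.') p)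
      rw [hx]
      simp [List.modifyHead]

theorem intercalate_dot_cons (x y : List Char) (ys : List (List Char)) :
    ['.'].intercalate (x :: y :: ys) = x ++ '.' :: ['.'].intercalate (y :: ys) := by
  simp [List.intercalate, List.intersperse]

theorem intercalate_dot_single (x : List Char) : ['.'].intercalate [x] = x := by
  simp [List.intercalate]

-- intercalating a partitioned list of parts
theorem intercalate_dot_append (x : List Char) (a b : List (List Char)) (hb : b ≠ []) :
    ['.'].intercalate ((x :: a) ++ b) = ['.'].intercalate (x :: a) ++ '.' :: ['.'].intercalate b := by
  induction a generalizing x with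
  | nil =>
    obtain ⟨y, b', rfl⟩ := List.exists_cons_of_ne_nil hb
    rw [List.singleton_append, intercalate_dot_cons, intercalate_dot_single]
  | cons x' a' ih =>
    rw [List.cons_append, List.cons_append, intercalate_dot_cons, ← List.cons_append, ih x',
      intercalate_dot_cons]
    simp [List.append_assoc]

-- the parts list A computes, on the Chars side
theorem parts_eq (url : String) :
    (PySem.Str.split? url ".").getD [] = (url.toList.splitOn '.').map String.ofList := by
  have hd : (".":String).toList = ['.'] := by decide
  simp [PySem.Str.split?, PySem.Chars.split?, hd, chars_splitOn_dot]

theorem splitOn_dot_ne_nil (l : List Char) : l.splitOn '.' ≠ [] := by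
  unfold List.splitOn
  exact List.splitOnP_ne_nil _ _

-- every popular TLD is a dot followed by the rest of its characters
theorem tld_shape (t : String) (ht : t ∈ popular_tlds) : ∃ r, t.toList = '.' :: r := by
  exact ⟨t.toList.tail, by fin_cases ht <;> decide⟩

-- the String the A-loop builds from the parts dropped at j, on the Chars side
theorem tld_toList (ps : List (List Char)) :
    ("." ++ PySem.Str.join "." (ps.map String.ofList)).toList
      = '.' :: ['.'].intercalate ps := by
  have hd : (".":String).toList = ['.'] := by decide
  simp [String.toList_append, PySem.Str.toList_join, PySem.Chars.join, hd,
    List.map_map, Function.comp_def]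

theorem main_fwd (url : String) (h : is_popular_tld url = true) :
    is_popular_tld_alt url = true := by
  simp only [is_popular_tld, parts_eq] at h
  set P := url.toList.splitOn '.' with hP
  by_cases h2 : PySem.List.len (P.map String.ofList) < 2
  · rw [if_pos h2] at h; exact absurd h (by simp)
  · rw [if_neg h2, List.any_eq_true] at h
    obtain ⟨i, hi, hcond⟩ := h
    rw [PySem.List.mem_pyRange_one] at hi
    have hlen : PySem.List.len (P.map String.ofList) = (P.length : Int) := by
      simp [PySem.List.len_eq]
    rw [hlen] at hi
    obtain ⟨hi0, hilt⟩ := hi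
    have hj1 : 1 ≤ (i + 1).toNat := by omega
    have hjlt : (i + 1).toNat < P.length := by omega
    have hslice : PySem.List.slice (P.map String.ofList) (some (i + 1))
        = (P.map String.ofList).drop (i + 1).toNat := by
      exact PySem.List.slice_from _ (by omega)
    rw [hslice, ← List.map_drop] at hcond
    have hmem : ("." ++ PySem.Str.join "." ((P.drop (i + 1).toNat).map String.ofList))
        ∈ popular_tlds := by simpa using hcond
    have htake : P.take (i + 1).toNat ≠ [] := by
      apply List.ne_nil_of_length_pos
      rw [List.length_take]
      omega
    have hdropne : P.drop (i + 1).toNat ≠ [] := by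
      apply List.ne_nil_of_length_pos
      rw [List.length_drop]
      omega
    obtain ⟨x0, a0, hx0⟩ := List.exists_cons_of_ne_nil htake
    have hurl : url.toList
        = ['.'].intercalate (P.take (i + 1).toNat) ++ '.' :: ['.'].intercalate (P.drop (i + 1).toNat) := by
      calc url.toList = ['.'].intercalate P := (List.intercalate_splitOn url.toList '.').symm
        _ = ['.'].intercalate (P.take (i + 1).toNat ++ P.drop (i + 1).toNat) := by
              rw [List.take_append_drop]
        _ = _ := by rw [hx0]; exact intercalate_dot_append _ _ _ hdropne
    simp only [is_popular_tld_alt, List.any_eq_true]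
    refine ⟨_, hmem, ?_⟩
    have hbridge : PySem.Str.endswith url ("." ++ PySem.Str.join "." ((P.drop (i + 1).toNat).map String.ofList))
        = PySem.Chars.endswith url.toList ("." ++ PySem.Str.join "." ((P.drop (i + 1).toNat).map String.ofList)).toList := by
      simp [PySem.Str.endswith_eq]
    rw [hbridge, PySem.Chars.endswith_iff, tld_toList]
    exact ⟨['.'].intercalate (P.take (i + 1).toNat), hurl.symm⟩

theorem main_bwd (url : String) (h : is_popular_tld_alt url = true) :
    is_popular_tld url = true := by
  simp only [is_popular_tld_alt, List.any_eq_true] at h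
  obtain ⟨t, ht, hend⟩ := h
  obtain ⟨r, htr⟩ := tld_shape t ht
  have hsuf : t.toList <:+ url.toList := by
    rw [← PySem.Chars.endswith_iff]
    simpa [PySem.Str.endswith_eq] using hend
  obtain ⟨p, hp⟩ := hsuf
  have hPsplit : url.toList.splitOn '.' = p.splitOn '.' ++ r.splitOn '.' := by
    rw [← hp, htr, splitOn_dot_append]
  obtain ⟨a, as, ha⟩ := List.exists_cons_of_ne_nil (splitOn_dot_ne_nil p)
  obtain ⟨b, bs, hb⟩ := List.exists_cons_of_ne_nil (splitOn_dot_ne_nil r)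
  have hj1 : 1 ≤ (p.splitOn '.').length := by rw [ha]; simp
  have hr1 : 1 ≤ (r.splitOn '.').length := by rw [hb]; simp
  simp only [is_popular_tld, parts_eq, hPsplit]
  have hlen : PySem.List.len (((p.splitOn '.') ++ (r.splitOn '.')).map String.ofList)
      = (((p.splitOn '.').length : Int) + ((r.splitOn '.').length : Int)) := by
    simp [PySem.List.len_eq]
  rw [hlen, if_neg (by omega), List.any_eq_true]
  refine ⟨((p.splitOn '.').length : Int) - 1, ?_, ?_⟩
  · rw [PySem.List.mem_pyRange_one]
    constructor
    · omega
    · omega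
  · have hidx : ((p.splitOn '.').length : Int) - 1 + 1 = ((p.splitOn '.').length : Int) := by ring
    rw [hidx, PySem.List.slice_from _ (by omega)]
    have hnat : (((p.splitOn '.').length : Int)).toNat = (p.splitOn '.').length := by omega
    rw [hnat, ← List.map_drop, List.drop_left]
    have heq : "." ++ PySem.Str.join "." ((r.splitOn '.').map String.ofList) = t := by
      rw [← String.toList_inj, tld_toList, List.intercalate_splitOn, htr]
    rw [heq]
    simpa using ht

-- ===== VERDICT (by name: the statement is the Claim_ definition above) =====
theorem is_popular_tld_spec : Claim_equal_is_popular_tld := by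
  intro url _
  unfold Spec_is_popular_tld
  cases hA : is_popular_tld url with
  | true => exact (main_fwd url hA).symm
  | false =>
    cases hB : is_popular_tld_alt url with
    | true => exact absurd (main_bwd url hB) (by simp [hA])
    | false => rfl
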